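-- pv_equiv track=rewrite | github.com/ananyamaurya/Python-and-Some-Python-Programming | KickStart2020.py | plusNum
-- ===== SOURCE A (Python) =====
-- odd = ['1','3','5','7','9']
--
-- def plusNum(num):
--     condition = True
--
--     while condition:
--         occurence = False
--         if (num%2 == 0):
--             for i in odd:
--
--                 if i in str(num):
--                     occurence = True
--
--                     break
--             if occurence == False:
--                 condition = False
--         num = num+1
--
--     return num
-- ===== SOURCE B (Python) =====
-- def _ceil_even(n):
--     if n <= 0:
--         return 0
--     q, r = divmod(n, 10)
--     g = _ceil_even(q)
--     if g > q:
--         return g * 10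
--     if r % 2 == 0:
--         return q * 10 + r
--     if r < 9:
--         return q * 10 + r + 1
--     return _ceil_even(q + 1) * 10
--
-- def _floor_even(k):
--     if k < 10:
--         return k - k % 2
--     q, r = divmod(k, 10)
--     f = _floor_even(q)
--     if f == q:
--         return 10 * q + r - r % 2
--     return 10 * f + 8
--
-- def plusNum(num):
--     if num >= 0:
--         return _ceil_even(num) + 1
--     return -_floor_even(-num) + 1
-- ===== Notes on version B (the rewrite author's own statement) =====
-- stated objective: faster
-- what changed: Replaced A's linear upward scan (testing every successive integer's decimal string for odd digits) with a direct digit-by-digit construction of the smallest all-even-digit number >= num (greedy with carry for nonnegative num, greedy floor for negative num), then +1.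
import Mathlib
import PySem

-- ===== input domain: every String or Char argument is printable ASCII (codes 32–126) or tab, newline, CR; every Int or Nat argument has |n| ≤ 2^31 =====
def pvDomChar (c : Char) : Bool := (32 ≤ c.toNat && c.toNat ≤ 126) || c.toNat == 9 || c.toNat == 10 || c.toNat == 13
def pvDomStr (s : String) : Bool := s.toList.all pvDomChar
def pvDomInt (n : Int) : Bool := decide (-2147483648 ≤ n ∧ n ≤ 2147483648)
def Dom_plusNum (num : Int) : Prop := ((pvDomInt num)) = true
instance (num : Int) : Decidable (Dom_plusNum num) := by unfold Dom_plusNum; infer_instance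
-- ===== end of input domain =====

-- B replaces A's linear upward scan with an O(digits) greedy digit construction of the
-- smallest all-even-digit number ≥ num (then +1); equivalence is proved for all inputs.


-- ===== PORT A =====
-- odd = ['1','3','5','7','9']
def pvOdd : List String := ["1", "3", "5", "7", "9"]

-- the inner 'for i in odd: if i in str(num): occurence = True; break'
def pvOccurence (num : Int) : Bool :=
  pvOdd.any (fun i => PySem.Str.isIn i (PySem.Int.toStr num))

-- fuel guard only (makes the while-loop total; proved sufficient below, value unchanged)
def pvFuel (num : Int) : Nat := 20 * num.natAbs + 2

-- the while-loop: stops (and returns num+1) at the first num with num%2==0 and no odd digit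
def plusNumGo : Nat → Int → Int
  | 0, num => num
  | fuel + 1, num =>
    if PySem.Int.mod num 2 == 0 && !(pvOccurence num) then num + 1
    else plusNumGo fuel (num + 1)

def plusNum (num : Int) : Int := plusNumGo (pvFuel num) num

-- ===== PORT B =====
-- smallest all-even-digit number ≥ n (for n ≥ 0); Source B's _ceil_even
-- (fuel = n.toNat + 1 is a totality guard only: every recursive call strictly
-- decreases the argument, and fuel > n is preserved, so fuel never runs out)
def ceilEvenGo : Nat → Int → Int
  | 0, _ => 0
  | fuel + 1, n =>
    if n ≤ 0 then 0
    else
      let q := PySem.Int.floordiv n 10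
      let r := PySem.Int.mod n 10
      let g := ceilEvenGo fuel q
      if q < g then g * 10
      else if PySem.Int.mod r 2 = 0 then q * 10 + r
      else if r < 9 then q * 10 + r + 1
      else ceilEvenGo fuel (q + 1) * 10

def ceilEven (n : Int) : Int := ceilEvenGo (n.toNat + 1) n

-- largest all-even-digit number ≤ k (for k ≥ 0); Source B's _floor_even
def floorEvenGo : Nat → Int → Int
  | 0, _ => 0
  | fuel + 1, k =>
    if k < 10 then k - PySem.Int.mod k 2
    else
      let q := PySem.Int.floordiv k 10
      let r := PySem.Int.mod k 10
      let f := floorEvenGo fuel q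
      if f = q then 10 * q + r - PySem.Int.mod r 2
      else 10 * f + 8

def floorEven (k : Int) : Int := floorEvenGo (k.toNat + 1) k

def plusNum_alt (num : Int) : Int :=
  if 0 ≤ num then ceilEven num + 1 else -(floorEven (-num)) + 1

-- ===== PRECONDITION & SPEC =====
def Spec_plusNum (num : Int) (out : Int) : Prop := out = plusNum_alt num
instance (num : Int) (out : Int) : Decidable (Spec_plusNum num out) := by unfold Spec_plusNum; infer_instance

-- ===== CLAIM (what is proved, stated in full; the proofs are below) =====
def Claim_equal_plusNum : Prop := ∀ (num : Int), Dom_plusNum num → Spec_plusNum num (plusNum num)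

-- ===== LEMMAS AND PROOFS =====

-- all decimal digits of n are even
def allEN (n : Nat) : Bool :=
  if n < 10 then n % 2 == 0 else (n % 2 == 0) && allEN (n / 10)
decreasing_by omega

def AE (m : Int) : Bool := allEN m.natAbs

lemma allEN_lt10 (n : Nat) (h : n < 10) : allEN n = (n % 2 == 0) := by
  rw [allEN]; simp [h]

lemma allEN_10 (q r : Nat) (hr : r < 10) :
    allEN (10 * q + r) = ((r % 2 == 0) && allEN q) := by
  rcases Nat.eq_zero_or_pos q with hq | hq
  · subst hq
    rw [allEN_lt10 _ (by omega)]
    rw [allEN_lt10 0 (by omega)]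
    simp
  · rw [allEN]
    have h10 : ¬ 10 * q + r < 10 := by omega
    simp only [h10, if_false]
    have e1 : (10 * q + r) % 2 = r % 2 := by omega
    have e2 : (10 * q + r) / 10 = q := by omega
    rw [e1, e2]

lemma allEN_even (n : Nat) (h : allEN n = true) : n % 2 = 0 := by
  rw [allEN] at h
  split at h
  · simpa using h
  · simp only [Bool.and_eq_true, beq_iff_eq] at h; exact h.1

lemma AE_decomp (q r : Int) (hq : 0 ≤ q) (hr0 : 0 ≤ r) (hr : r < 10) :
    AE (10 * q + r) = true ↔ (r % 2 = 0 ∧ AE q = true) := by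
  unfold AE
  have e1 : (10 * q + r).natAbs = 10 * q.natAbs + r.natAbs := by omega
  rw [e1, allEN_10 _ _ (by omega)]
  simp only [Bool.and_eq_true, beq_iff_eq]
  constructor
  · rintro ⟨h1, h2⟩; exact ⟨by omega, h2⟩
  · rintro ⟨h1, h2⟩; exact ⟨by omega, h2⟩

lemma AE_even (m : Int) (h : AE m = true) : m % 2 = 0 := by
  unfold AE at h
  have := allEN_even _ h
  omega

lemma AE_neg (m : Int) : AE (-m) = AE m := by
  unfold AE; rw [Int.natAbs_neg]

lemma AE_zero : AE 0 = true := by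
  unfold AE
  rw [show (0 : Int).natAbs = 0 from rfl, allEN_lt10 0 (by omega)]
  decide

lemma AE_lt10 (m : Int) (h0 : 0 ≤ m) (h : m < 10) : AE m = true ↔ m % 2 = 0 := by
  have e : m = 10 * 0 + m := by ring
  rw [e] at *
  rw [AE_decomp 0 m le_rfl h0 (by omega)]
  simp [AE_zero]

lemma AE_split (m : Int) (hm : 0 ≤ m) :
    AE m = true ↔ (m % 10 % 2 = 0 ∧ AE (m / 10) = true) := by
  have e : m = 10 * (m / 10) + m % 10 := by omega
  conv_lhs => rw [e]
  exact AE_decomp (m / 10) (m % 10) (by omega) (by omega) (by omega)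

lemma AE_two_pow (d : Nat) : AE (2 * 10 ^ d) = true := by
  induction d with
  | zero =>
    rw [show (2 : Int) * 10 ^ 0 = 2 by norm_num, AE_lt10 2 (by norm_num) (by norm_num)]
    norm_num
  | succ d ih =>
    have e : (2 : Int) * 10 ^ (d + 1) = 10 * (2 * 10 ^ d) + 0 := by ring
    rw [e, AE_decomp _ _ (by positivity) le_rfl (by omega)]
    exact ⟨by omega, ih⟩

-- ceilEven is the least all-even-digit number ≥ n
lemma ceilEvenGo_spec (N : Nat) : ∀ n : Int, 0 ≤ n → n < (N : Int) →
    AE (ceilEvenGo N n) = true ∧ n ≤ ceilEvenGo N n ∧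
      ∀ m, n ≤ m → AE m = true → ceilEvenGo N n ≤ m := by
  induction N with
  | zero => intro n h0 h1; omega
  | succ N ih =>
    intro n h0 h1
    rw [ceilEvenGo]
    by_cases hn : n ≤ 0
    · rw [if_pos hn]
      refine ⟨AE_zero, by omega, ?_⟩
      intro m hm hAE
      have := AE_even m hAE
      -- m ≥ n and AE m; need 0 ≤ m: n = 0 here
      omega
    · rw [if_neg hn]
      have hdiv := PySem.Int.floordiv_eq_ediv_of_pos (a := n) (b := 10) (by norm_num)
      have hmod := PySem.Int.mod_eq_emod_of_pos (a := n) (b := 10) (by norm_num)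
      rw [hdiv, hmod]
      set q : Int := n / 10 with hq
      set r : Int := n % 10 with hr
      have hn' : n = 10 * q + r := by omega
      have hr0 : 0 ≤ r := by omega
      have hr9 : r < 10 := by omega
      have hq0 : 0 ≤ q := by omega
      obtain ⟨AEg, hqg, ming⟩ := ih q hq0 (by omega)
      set g : Int := ceilEvenGo N q with hg
      by_cases hlt : q < g
      · rw [if_pos hlt]
        have AEg10 : AE (g * 10) = true := by
          have e : g * 10 = 10 * g + 0 := by ring
          rw [e, AE_decomp g 0 (by omega) le_rfl (by omega)]
          exact ⟨by omega, AEg⟩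
        refine ⟨AEg10, by omega, ?_⟩
        intro m hm hAEm
        have hm0 : 0 ≤ m := by omega
        obtain ⟨hmr, hmq⟩ := (AE_split m hm0).mp hAEm
        have hmqq : q ≤ m / 10 := by omega
        have hne : m / 10 ≠ q := by
          intro he
          have := ming q le_rfl (he ▸ hmq)
          omega
        have : g ≤ m / 10 := ming (m / 10) (by omega) hmq
        omega
      · rw [if_neg hlt]
        have hgq : g = q := by omega
        have AEq : AE q = true := hgq ▸ AEg
        by_cases hre : PySem.Int.mod r 2 = 0
        · rw [if_pos hre]
          have hre' : r % 2 = 0 := by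
            rw [PySem.Int.mod_eq_emod_of_pos (a := r) (b := 2) (by norm_num)] at hre
            exact hre
          have : AE (q * 10 + r) = true := by
            have e : q * 10 + r = 10 * q + r := by ring
            rw [e, AE_decomp q r hq0 hr0 hr9]
            exact ⟨hre', AEq⟩
          exact ⟨this, by omega, fun m hm _ => by omega⟩
        · rw [if_neg hre]
          have hro : r % 2 = 1 := by
            rw [PySem.Int.mod_eq_emod_of_pos (a := r) (b := 2) (by norm_num)] at hre
            omega
          have hnotAEn : AE n = true → False := by
            intro h
            obtain ⟨h1, _⟩ := (AE_split n (by omega)).mp h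
            omega
          by_cases hr8 : r < 9
          · rw [if_pos hr8]
            have : AE (q * 10 + r + 1) = true := by
              have e : q * 10 + r + 1 = 10 * q + (r + 1) := by ring
              rw [e, AE_decomp q (r + 1) hq0 (by omega) (by omega)]
              exact ⟨by omega, AEq⟩
            refine ⟨this, by omega, ?_⟩
            intro m hm hAEm
            have : m ≠ n := fun he => hnotAEn (he ▸ hAEm)
            omega
          · rw [if_neg hr8]
            have hr9' : r = 9 := by omega
            obtain ⟨AEg2, hqg2, ming2⟩ := ih (q + 1) (by omega) (by omega)
            set g2 : Int := ceilEvenGo N (q + 1) with hg2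
            have AEg210 : AE (g2 * 10) = true := by
              have e : g2 * 10 = 10 * g2 + 0 := by ring
              rw [e, AE_decomp g2 0 (by omega) le_rfl (by omega)]
              exact ⟨by omega, AEg2⟩
            refine ⟨AEg210, by omega, ?_⟩
            intro m hm hAEm
            have hm0 : 0 ≤ m := by omega
            obtain ⟨hmr, hmq⟩ := (AE_split m hm0).mp hAEm
            have hmq1 : q + 1 ≤ m / 10 := by omega
            have : g2 ≤ m / 10 := ming2 (m / 10) hmq1 hmq
            omega


lemma ceilEven_spec (n : Int) (h0 : 0 ≤ n) :
    AE (ceilEven n) = true ∧ n ≤ ceilEven n ∧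
      ∀ m, n ≤ m → AE m = true → ceilEven n ≤ m := by
  unfold ceilEven
  exact ceilEvenGo_spec (n.toNat + 1) n h0 (by omega)

-- floorEven is the greatest all-even-digit number in [0, k]
lemma floorEvenGo_spec (N : Nat) : ∀ k : Int, 0 ≤ k → k < (N : Int) →
    AE (floorEvenGo N k) = true ∧ 0 ≤ floorEvenGo N k ∧ floorEvenGo N k ≤ k ∧
      ∀ m, 0 ≤ m → m ≤ k → AE m = true → m ≤ floorEvenGo N k := by
  induction N with
  | zero => intro k h0 h1; omega
  | succ N ih =>
    intro k h0 h1
    rw [floorEvenGo]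
    by_cases hk : k < 10
    · rw [if_pos hk]
      rw [PySem.Int.mod_eq_emod_of_pos (a := k) (b := 2) (by norm_num)]
      have hAE : AE (k - k % 2) = true := by
        rw [AE_lt10 _ (by omega) (by omega)]; omega
      refine ⟨hAE, by omega, by omega, ?_⟩
      intro m hm0 hmk hAEm
      have := AE_even m hAEm
      omega
    · rw [if_neg hk]
      have hdiv := PySem.Int.floordiv_eq_ediv_of_pos (a := k) (b := 10) (by norm_num)
      have hmod := PySem.Int.mod_eq_emod_of_pos (a := k) (b := 10) (by norm_num)
      rw [hdiv, hmod]
      set q : Int := k / 10 with hq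
      set r : Int := k % 10 with hr
      have hk' : k = 10 * q + r := by omega
      have hr0 : 0 ≤ r := by omega
      have hr9 : r < 10 := by omega
      have hq0 : 0 ≤ q := by omega
      obtain ⟨AEf, hf0, hfq, maxf⟩ := ih q hq0 (by omega)
      set f : Int := floorEvenGo N q with hf
      by_cases hfe : f = q
      · rw [if_pos hfe]
        rw [PySem.Int.mod_eq_emod_of_pos (a := r) (b := 2) (by norm_num)]
        have AEq : AE q = true := hfe ▸ AEf
        have hAE : AE (10 * q + r - r % 2) = true := by
          have e : 10 * q + r - r % 2 = 10 * q + (r - r % 2) := by ring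
          rw [e, AE_decomp q (r - r % 2) hq0 (by omega) (by omega)]
          exact ⟨by omega, AEq⟩
        refine ⟨hAE, by omega, by omega, ?_⟩
        intro m hm0 hmk hAEm
        obtain ⟨hmr, hmq⟩ := (AE_split m hm0).mp hAEm
        have hmqq : m / 10 ≤ q := by omega
        by_cases he : m / 10 = q
        · omega
        · omega
      · rw [if_neg hfe]
        have hfq' : f < q := by omega
        have hnAEq : AE q = true → False := by
          intro h
          have := maxf q hq0 le_rfl h
          omega
        have hAE : AE (10 * f + 8) = true := by
          rw [AE_decomp f 8 hf0 (by omega) (by omega)]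
          exact ⟨by omega, AEf⟩
        refine ⟨hAE, by omega, by omega, ?_⟩
        intro m hm0 hmk hAEm
        obtain ⟨hmr, hmq⟩ := (AE_split m hm0).mp hAEm
        have hmqq : m / 10 ≤ q := by omega
        have hne : m / 10 ≠ q := fun he => hnAEq (he ▸ hmq)
        have : m / 10 ≤ f := maxf (m / 10) (by omega) (by omega) hmq
        omega


lemma floorEven_spec (k : Int) (h0 : 0 ≤ k) :
    AE (floorEven k) = true ∧ 0 ≤ floorEven k ∧ floorEven k ≤ k ∧
      ∀ m, 0 ≤ m → m ≤ k → AE m = true → m ≤ floorEven k := by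
  unfold floorEven
  exact floorEvenGo_spec (k.toNat + 1) k h0 (by omega)

-- the decimal digit characters of n, as Nat.toDigits produces them
def dstr (n : Nat) : List Char :=
  if n < 10 then [Nat.digitChar n] else dstr (n / 10) ++ [Nat.digitChar (n % 10)]
decreasing_by omega

lemma toDigitsCore_eq (N : Nat) : ∀ n : Nat, n ≤ N → ∀ fuel ds, n < fuel →
    Nat.toDigitsCore 10 fuel n ds = dstr n ++ ds := by
  induction N with
  | zero =>
    intro n hn fuel ds hf
    interval_cases n
    match fuel, hf with
    | f + 1, _ =>
      rw [dstr]
      simp [Nat.toDigitsCore]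
  | succ N ih =>
    intro n hn fuel ds hf
    match fuel, hf with
    | f + 1, hf =>
      rw [Nat.toDigitsCore]
      by_cases h10 : n < 10
      · have e0 : n / 10 = 0 := by omega
        simp only [e0, if_true]
        rw [dstr]
        have : n % 10 = n := by omega
        simp [h10, this]
      · have e0 : ¬ n / 10 = 0 := by omega
        simp only [e0, if_false]
        rw [ih (n / 10) (by omega) f _ (by omega)]
        conv_rhs => rw [dstr]
        simp [h10]

lemma toDigits_eq_dstr (n : Nat) : Nat.toDigits 10 n = dstr n := by
  have := toDigitsCore_eq n n le_rfl (n + 1) [] (by omega)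
  simpa [Nat.toDigits] using this

def isOddChar (c : Char) : Prop := c = '1' ∨ c = '3' ∨ c = '5' ∨ c = '7' ∨ c = '9'

lemma digitChar_odd (d : Nat) (h : d < 10) : isOddChar (Nat.digitChar d) ↔ d % 2 = 1 := by
  unfold isOddChar
  interval_cases d <;> simp <;> decide

lemma dstr_odd (N : Nat) : ∀ n : Nat, n ≤ N →
    ((∃ c ∈ dstr n, isOddChar c) ↔ allEN n = false) := by
  induction N with
  | zero =>
    intro n hn
    interval_cases n
    have e1 : dstr 0 = [Nat.digitChar 0] := by rw [dstr]; simp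
    have e2 : allEN 0 = true := by rw [allEN_lt10 0 (by norm_num)]; decide
    rw [e1, e2]
    rw [show Nat.digitChar 0 = '0' from rfl]
    simp [isOddChar]
  | succ N ih =>
    intro n hn
    rw [dstr]
    by_cases h10 : n < 10
    · simp only [h10, if_true]
      rw [allEN_lt10 n h10]
      simp [digitChar_odd n h10]
    · simp only [h10, if_false]
      have hd : n = 10 * (n / 10) + n % 10 := by omega
      have hallEN : allEN n = ((n % 10 % 2 == 0) && allEN (n / 10)) := by
        conv_lhs => rw [hd]
        rw [allEN_10 _ _ (by omega)]
      rw [hallEN]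
      have ihq := ih (n / 10) (by omega)
      constructor
      · rintro ⟨c, hc, hodd⟩
        rcases List.mem_append.mp hc with hc1 | hc2
        · have : allEN (n / 10) = false := ihq.mp ⟨c, hc1, hodd⟩
          simp [this]
        · simp only [List.mem_singleton] at hc2
          subst hc2
          have := (digitChar_odd (n % 10) (by omega)).mp hodd
          simp [this]
      · intro h
        rcases Bool.and_eq_false_iff.mp h with h1 | h1
        · have : n % 10 % 2 = 1 := by
            simp only [beq_eq_false_iff_ne] at h1
            omega
          refine ⟨Nat.digitChar (n % 10), by simp, ?_⟩
          exact (digitChar_odd (n % 10) (by omega)).mpr this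
        · obtain ⟨c, hc, hodd⟩ := ihq.mpr h1
          exact ⟨c, List.mem_append.mpr (Or.inl hc), hodd⟩

lemma mem_toChars_iff (num : Int) (c : Char) (hc : isOddChar c) :
    c ∈ PySem.Int.toChars num ↔ c ∈ dstr num.natAbs := by
  unfold PySem.Int.toChars
  split
  · rename_i hneg
    rw [toDigits_eq_dstr]
    simp only [List.mem_cons]
    constructor
    · rintro (h | h)
      · exfalso; subst h
        rcases hc with h | h | h | h | h <;> exact absurd h (by decide)
      · exact h
    · exact Or.inr
  · rename_i hpos
    rw [toDigits_eq_dstr]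
    have : num.toNat = num.natAbs := by omega
    rw [this]

lemma occurence_iff (num : Int) :
    pvOccurence num = true ↔ allEN num.natAbs = false := by
  rw [← dstr_odd num.natAbs num.natAbs le_rfl]
  unfold pvOccurence pvOdd
  simp only [List.any_eq_true, List.mem_cons, List.not_mem_nil, or_false]
  constructor
  · rintro ⟨i, hi, hIn⟩
    rw [PySem.Str.isIn_iff_infix] at hIn
    have hex : ∃ c, i.toList = [c] ∧ isOddChar c := by
      rcases hi with h | h | h | h | h <;> subst h
      · exact ⟨'1', rfl, by unfold isOddChar; decide⟩
      · exact ⟨'3', rfl, by unfold isOddChar; decide⟩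
      · exact ⟨'5', rfl, by unfold isOddChar; decide⟩
      · exact ⟨'7', rfl, by unfold isOddChar; decide⟩
      · exact ⟨'9', rfl, by unfold isOddChar; decide⟩
    obtain ⟨c, hcl, hodd⟩ := hex
    rw [hcl, List.singleton_infix_iff, PySem.Int.toList_toStr] at hIn
    exact ⟨c, (mem_toChars_iff num c hodd).mp hIn, hodd⟩
  · rintro ⟨c, hc, hodd⟩
    have hmem : c ∈ (PySem.Int.toStr num).toList := by
      rw [PySem.Int.toList_toStr]
      exact (mem_toChars_iff num c hodd).mpr hc
    unfold isOddChar at hodd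
    rcases hodd with h | h | h | h | h <;> subst h
    · exact ⟨"1", Or.inl rfl, by
        rw [PySem.Str.isIn_iff_infix]; exact (List.singleton_infix_iff _ _).mpr hmem⟩
    · exact ⟨"3", Or.inr (Or.inl rfl), by
        rw [PySem.Str.isIn_iff_infix]; exact (List.singleton_infix_iff _ _).mpr hmem⟩
    · exact ⟨"5", Or.inr (Or.inr (Or.inl rfl)), by
        rw [PySem.Str.isIn_iff_infix]; exact (List.singleton_infix_iff _ _).mpr hmem⟩
    · exact ⟨"7", Or.inr (Or.inr (Or.inr (Or.inl rfl))), by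
        rw [PySem.Str.isIn_iff_infix]; exact (List.singleton_infix_iff _ _).mpr hmem⟩
    · exact ⟨"9", Or.inr (Or.inr (Or.inr (Or.inr rfl))), by
        rw [PySem.Str.isIn_iff_infix]; exact (List.singleton_infix_iff _ _).mpr hmem⟩

-- A's stopping condition is exactly "all digits even"
lemma stop_iff (num : Int) :
    (PySem.Int.mod num 2 == 0 && !(pvOccurence num)) = AE num := by
  have hmod := PySem.Int.mod_eq_emod_of_pos (a := num) (b := 2) (by norm_num)
  rw [hmod]
  rcases hAE : AE num with _ | _
  · have hocc : pvOccurence num = true :=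
      (occurence_iff num).mpr (by unfold AE at hAE; exact hAE)
    simp [hocc]
  · have heven : num % 2 = 0 := AE_even num hAE
    have hocc : pvOccurence num = false := by
      rcases h : pvOccurence num with _ | _
      · rfl
      · have h2 := (occurence_iff num).mp h
        unfold AE at hAE
        rw [hAE] at h2
        cases h2
    simp [hocc, heven]

-- the loop returns (least all-even ≥ num) + 1, given enough fuel
lemma plusNumGo_eq (fuel : Nat) : ∀ num v : Int,
    AE v = true → num ≤ v → (∀ m, num ≤ m → AE m = true → v ≤ m) →
    (v - num).toNat < fuel → plusNumGo fuel num = v + 1 := by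
  induction fuel with
  | zero => intro num v _ _ _ hf; omega
  | succ fuel ih =>
    intro num v hAE hle hmin hf
    rw [plusNumGo]
    rw [stop_iff num]
    rcases h : AE num with _ | _
    · simp only [Bool.false_eq_true, if_false]
      have hne : v ≠ num := fun he => by rw [he] at hAE; simp_all
      exact ih (num + 1) v hAE (by omega)
        (fun m hm hAEm => hmin m (by omega) hAEm) (by omega)
    · simp only [if_true]
      have : v ≤ num := hmin num le_rfl h
      omega

-- the least all-even-digit number ≥ num, and a size bound, for each sign
lemma least_pos (num : Int) (h0 : 0 ≤ num) :
    AE (ceilEven num) = true ∧ num ≤ ceilEven num ∧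
      (∀ m, num ≤ m → AE m = true → ceilEven num ≤ m) ∧ ceilEven num ≤ 20 * num + 1 := by
  obtain ⟨h1, h2, h3⟩ := ceilEven_spec num h0
  refine ⟨h1, h2, h3, ?_⟩
  by_cases hz : num = 0
  · subst hz
    have := h3 0 le_rfl AE_zero
    omega
  · -- candidate 2 * 10 ^ (log10 num + 1): all-even, ≥ num, ≤ 20 * num
    set d : Nat := Nat.log 10 num.toNat with hd
    have hlt : num.toNat < 10 ^ (d + 1) := Nat.lt_pow_succ_log_self (by norm_num) _
    have hge : 10 ^ d ≤ num.toNat := Nat.pow_log_le_self 10 (by omega)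
    have hY : ((10 ^ (d + 1) : Nat) : Int) = 10 ^ (d + 1) := by push_cast; ring
    have hc := h3 (2 * 10 ^ (d + 1)) (by rw [← hY]; omega) (AE_two_pow (d + 1))
    have hX : ((10 ^ d : Nat) : Int) = 10 ^ d := by push_cast; ring
    have hpow : (2 : Int) * 10 ^ (d + 1) = 20 * ((10 ^ d : Nat) : Int) := by
      rw [hX]; ring
    rw [hpow] at hc
    omega

lemma least_neg (num : Int) (h0 : num < 0) :
    AE (-(floorEven (-num))) = true ∧ num ≤ -(floorEven (-num)) ∧
      (∀ m, num ≤ m → AE m = true → -(floorEven (-num)) ≤ m) ∧ 0 ≤ floorEven (-num) := by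
  obtain ⟨h1, h2, h3, h4⟩ := floorEven_spec (-num) (by omega)
  refine ⟨by rw [AE_neg]; exact h1, by omega, ?_, h2⟩
  intro m hm hAEm
  by_cases hm0 : 0 ≤ m
  · omega
  · have : -m ≤ floorEven (-num) := h4 (-m) (by omega) (by omega) (by rwa [AE_neg])
    omega

-- ===== VERDICT (by name: the statement is the Claim_ definition above) =====
theorem plusNum_spec : Claim_equal_plusNum := by
  intro num _
  unfold Spec_plusNum plusNum plusNum_alt pvFuel
  by_cases h0 : 0 ≤ num
  · rw [if_pos h0]
    obtain ⟨h1, h2, h3, h4⟩ := least_pos num h0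
    exact plusNumGo_eq _ num (ceilEven num) h1 h2 h3 (by omega)
  · rw [if_neg h0]
    obtain ⟨h1, h2, h3, h4⟩ := least_neg num (by omega)
    exact plusNumGo_eq _ num (-(floorEven (-num))) h1 h2 h3 (by omega)
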